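-- pv_equiv track=rewrite | github.com/better1593/ElectricPowerSystem | Tower_V3/Block_Circuit_Build/Span_Circuit_Build.py | Cond_ID_Read
-- ===== SOURCE A (Python) =====
-- def Cond_ID_Read(Cir, Pos):
--     # Return Conductor ID of a Span given by Pos
--     # Pos = [T/S/C, id, cir_id, phas_id, cond_id, seg_id]
--
--     cir_id = Pos[2]  # cir_id
--     pha_id = Pos[3]  # pha_id
--
--     if cir_id in [row[0] for row in Cir['dat']]:
--         idx = [row[0] for row in Cir['dat']].index(cir_id)
--         if idx == 0:
--             con_id = pha_id  # 电路组中的ID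
--         else:
--             con_id = sum([row[1] for row in Cir['dat'][:idx]], 1) + pha_id - 1
--     else:
--         raise ValueError('ID in Global Data and Tower/Span Data does not match')
--
--     return con_id
-- ===== SOURCE B (Python) =====
-- def Cond_ID_Read(Cir, Pos):
--     # Single prefix-accumulating pass: no membership pre-scan, no .index, no slice-sum.
--     cir_id = Pos[2]
--     pha_id = Pos[3]
--     prefix = 0
--     for row in Cir['dat']:
--         if row[0] == cir_id:
--             return prefix + pha_id
--         prefix += row[1]
--     raise ValueError('ID in Global Data and Tower/Span Data does not match')
-- ===== Notes on version B (the rewrite author's own statement) =====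
-- stated objective: simpler
-- what changed: Replaced A's three passes over Cir['dat'] (list-comprehension membership test, .index scan, and slice-plus-sum) by a single enumeration that accumulates the prefix sum of row[1] and returns prefix + pha_id at the first row whose row[0] equals cir_id.
import Mathlib
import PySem

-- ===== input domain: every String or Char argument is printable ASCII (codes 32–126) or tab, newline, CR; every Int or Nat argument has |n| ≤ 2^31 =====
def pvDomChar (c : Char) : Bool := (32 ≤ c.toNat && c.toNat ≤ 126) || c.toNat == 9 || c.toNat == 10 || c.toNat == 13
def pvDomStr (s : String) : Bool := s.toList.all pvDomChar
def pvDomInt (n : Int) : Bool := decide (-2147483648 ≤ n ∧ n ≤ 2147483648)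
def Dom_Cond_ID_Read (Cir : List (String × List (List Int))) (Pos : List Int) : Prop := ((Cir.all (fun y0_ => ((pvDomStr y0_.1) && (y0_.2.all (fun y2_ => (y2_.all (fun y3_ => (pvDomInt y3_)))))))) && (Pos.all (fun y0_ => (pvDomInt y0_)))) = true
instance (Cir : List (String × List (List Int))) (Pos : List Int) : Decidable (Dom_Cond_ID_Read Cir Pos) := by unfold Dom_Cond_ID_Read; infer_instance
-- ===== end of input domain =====

-- B replaces A's three scans (membership test, .index, slice-sum) by one prefix-accumulating pass; objective: simpler.


-- row0 row = row[0] as an Int (0 only outside Pre_, where rows are nonempty); row1 likewise for row[1]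
def pvRow0 (row : List Int) : Int := (PySem.List.pyGet? row 0).getD 0
def pvRow1 (row : List Int) : Int := (PySem.List.pyGet? row 1).getD 0

-- ===== PORT A =====
def Cond_ID_Read (Cir : List (String × List (List Int))) (Pos : List Int) : Int :=
  let cir_id : Int := (PySem.List.pyGet? Pos 2).getD 0
  let pha_id : Int := (PySem.List.pyGet? Pos 3).getD 0
  let dat : List (List Int) := ((PySem.Dict.mk Cir).get? "dat").getD []
  if cir_id ∈ dat.map pvRow0 then
    let idx : Nat := (PySem.List.index? (dat.map pvRow0) cir_id).getD 0
    if idx = 0 then pha_id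
    else ((PySem.List.slice dat none (some (idx : Int))).map pvRow1).foldl (· + ·) 1 + pha_id - 1
  else 0   -- Python raises ValueError here; excluded by Pre_

-- ===== PORT B =====
def condIdGo (cir_id pha_id : Int) : List (List Int) → Int → Int
  | [], _ => 0   -- Python raises ValueError here; excluded by Pre_
  | row :: rest, pre =>
      if pvRow0 row = cir_id then pre + pha_id
      else condIdGo cir_id pha_id rest (pre + pvRow1 row)

def Cond_ID_Read_alt (Cir : List (String × List (List Int))) (Pos : List Int) : Int :=
  condIdGo ((PySem.List.pyGet? Pos 2).getD 0) ((PySem.List.pyGet? Pos 3).getD 0)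
    (((PySem.Dict.mk Cir).get? "dat").getD []) 0

-- ===== PRECONDITION & SPEC =====
-- Pre_ = exactly where Python A returns: key 'dat' present, Pos has indices 2 and 3, every row
-- nonempty (A reads row[0] of all rows), cir_id occurs among the row[0]s, and every row strictly
-- before the first match has a row[1] (A sums those).
def Pre_Cond_ID_Read (Cir : List (String × List (List Int))) (Pos : List Int) : Prop :=
  4 ≤ Pos.length ∧
  ((PySem.Dict.mk Cir).get? "dat").isSome = true ∧
  (∀ row ∈ ((PySem.Dict.mk Cir).get? "dat").getD [], row ≠ []) ∧
  ((PySem.List.pyGet? Pos 2).getD 0) ∈ (((PySem.Dict.mk Cir).get? "dat").getD []).map pvRow0 ∧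
  (∀ row ∈ (((PySem.Dict.mk Cir).get? "dat").getD []).takeWhile
      (fun row => pvRow0 row != (PySem.List.pyGet? Pos 2).getD 0), 2 ≤ row.length)
instance (Cir : List (String × List (List Int))) (Pos : List Int) : Decidable (Pre_Cond_ID_Read Cir Pos) := by
  unfold Pre_Cond_ID_Read; infer_instance

def pvWitness_Cond_ID_Read : (List (String × List (List Int))) × List Int :=
  ([("dat", [[1, 2], [5, 3], [7, 1]])], [0, 0, 5, 2])

def Spec_Cond_ID_Read (Cir : List (String × List (List Int))) (Pos : List Int) (out : Int) : Prop := out = Cond_ID_Read_alt Cir Pos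
instance (Cir : List (String × List (List Int))) (Pos : List Int) (out : Int) : Decidable (Spec_Cond_ID_Read Cir Pos out) := by unfold Spec_Cond_ID_Read; infer_instance

-- ===== CLAIM (what is proved, stated in full; the proofs are below) =====
def Claim_equal_Cond_ID_Read : Prop := ∀ (Cir : List (String × List (List Int))) (Pos : List Int), Dom_Cond_ID_Read Cir Pos → Pre_Cond_ID_Read Cir Pos → Spec_Cond_ID_Read Cir Pos (Cond_ID_Read Cir Pos)

-- ===== LEMMAS AND PROOFS =====

theorem foldl_add_int (l : List Int) (c : Int) : l.foldl (· + ·) c = c + l.foldl (· + ·) 0 := by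
  induction l generalizing c with
  | nil => simp
  | cons x xs ih => simp only [List.foldl_cons]; rw [ih (c + x), ih (0 + x)]; ring

-- B's single pass equals "prefix up to the first match, plus pha_id", for any accumulator.
theorem condIdGo_eq (cir pha : Int) (dat : List (List Int)) (pre : Int)
    (hmem : cir ∈ dat.map pvRow0) :
    condIdGo cir pha dat pre =
      pre + ((dat.take ((PySem.List.index? (dat.map pvRow0) cir).getD 0)).map pvRow1).foldl (· + ·) 0 + pha := by
  induction dat generalizing pre with
  | nil => simp at hmem
  | cons row rest ih =>
    by_cases h : pvRow0 row = cir
    · subst h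
      simp only [condIdGo, List.map_cons]
      rw [PySem.List.index?_cons_self]
      simp
    · have hmem' : cir ∈ rest.map pvRow0 := by
        simp only [List.map_cons, List.mem_cons] at hmem
        exact hmem.resolve_left (fun e => h e.symm)
      obtain ⟨k, hk⟩ := (PySem.List.index?_isSome_iff (rest.map pvRow0) cir).mpr hmem' |> Option.isSome_iff_exists.mp
      simp only [condIdGo, if_neg h, List.map_cons]
      rw [PySem.List.index?_cons_of_ne (List.map pvRow0 rest) h, hk, ih (pre + pvRow1 row) hmem', hk]
      simp only [Option.map_some, Option.getD_some, List.take_succ_cons, List.map_cons, List.foldl_cons]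
      rw [foldl_add_int _ (0 + pvRow1 row)]
      ring

-- ===== VERDICT (by name: the statement is the Claim_ definition above) =====
theorem Cond_ID_Read_spec : Claim_equal_Cond_ID_Read := by
  intro Cir Pos _ hpre
  obtain ⟨-, -, -, hmem, -⟩ := hpre
  unfold Spec_Cond_ID_Read Cond_ID_Read Cond_ID_Read_alt
  set cir : Int := (PySem.List.pyGet? Pos 2).getD 0 with hcir
  set pha : Int := (PySem.List.pyGet? Pos 3).getD 0
  set dat : List (List Int) := ((PySem.Dict.mk Cir).get? "dat").getD [] with hdat
  rw [if_pos hmem]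
  set idx : Nat := (PySem.List.index? (dat.map pvRow0) cir).getD 0 with hidx
  rw [condIdGo_eq cir pha dat 0 hmem, ← hidx]
  by_cases h0 : idx = 0
  · simp [h0]
  · rw [if_neg h0, PySem.List.slice_to_natCast, foldl_add_int _ 1]
    ring
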